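-- pv_equiv track=rewrite | github.com/gnithin/AOC | 2018/Q2/main.py | find_checksum
-- ===== SOURCE A (Python) =====
-- def find_checksum(ids):
--     num_3 = 0
--     num_2 = 0
--     for entry in ids:
--         freq_map = find_freq(entry)
--         temp_freq_store = [0, 0]
--         for c in freq_map:
--             freq = freq_map[c]
--             if freq > 2:
--                 temp_freq_store[1] = 1
--             elif freq == 2:
--                 temp_freq_store[0] = 1
--         num_2 += temp_freq_store[0]
--         num_3 += temp_freq_store[1]
--     return num_2 * num_3
--
-- def find_freq(entry):
--     freq_map = {}
--     for c in entry:
--         if c in freq_map: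
--             freq_map[c] += 1
--         else:
--             freq_map[c] = 1
--     return freq_map
-- ===== SOURCE B (Python) =====
-- def find_checksum(ids):
--     twos = 0
--     threes = 0
--     for entry in ids:
--         runs = run_lengths(sorted(entry))
--         if 2 in runs:
--             twos += 1
--         if any(r > 2 for r in runs):
--             threes += 1
--     return twos * threes
--
-- def run_lengths(chars):
--     # run lengths of a sorted char list: each run is one distinct char's count
--     if not chars:
--         return []
--     c = chars[0]
--     i = 1
--     while i < len(chars) and chars[i] == c:
--         i += 1
--     return [i] + run_lengths(chars[i:])
-- ===== Notes on version B (the rewrite author's own statement) =====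
-- stated objective: alternative
-- what changed: Replaces A's hash-map character counting (find_freq dict plus key scan setting flags) with sort-then-group: each entry is sorted and scanned once into its list of run lengths, and the two/three flags are membership/any tests on that run-length list.
import Mathlib
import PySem

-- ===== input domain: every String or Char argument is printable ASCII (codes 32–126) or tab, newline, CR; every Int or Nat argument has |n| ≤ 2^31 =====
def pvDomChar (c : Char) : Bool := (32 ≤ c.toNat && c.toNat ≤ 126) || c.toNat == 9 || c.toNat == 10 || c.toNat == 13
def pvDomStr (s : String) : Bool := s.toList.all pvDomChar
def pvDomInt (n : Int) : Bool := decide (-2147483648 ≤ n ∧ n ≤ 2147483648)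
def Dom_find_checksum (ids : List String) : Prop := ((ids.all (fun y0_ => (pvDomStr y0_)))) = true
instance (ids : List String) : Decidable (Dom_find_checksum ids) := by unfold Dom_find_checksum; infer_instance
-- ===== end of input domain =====

-- B replaces A's hash-map character counting with sort-then-group: each entry is sorted,
-- scanned once into its run lengths, and the two/three flags are tests on that list (alternative).

-- ===== PORT A =====
def find_freq (entry : String) : PySem.Dict Char Int :=
  entry.toList.foldl
    (fun d c => if d.contains c then d.insert c (d.getD c 0 + 1) else d.insert c 1)
    PySem.Dict.empty

def find_checksum (ids : List String) : Int :=
  -- st = (num_3, num_2); tf = (two-flag, three-flag) mirroring temp_freq_store[0], [1]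
  let r := ids.foldl (fun (st : Int × Int) entry =>
    let fm := find_freq entry
    let tf := fm.keys.foldl (fun (t : Int × Int) c =>
      let freq := fm.getD c 0
      if freq > 2 then (t.1, 1)
      else if freq = 2 then (1, t.2)
      else t) (0, 0)
    (st.1 + tf.2, st.2 + tf.1)) (0, 0)
  r.2 * r.1

-- ===== PORT B =====
-- run_lengths of Source B: the inner while-loop 'i' is 1 + length of the run of chars[0] in the tail
def runLengths (xs : List Char) : List Int :=
  match xs with
  | [] => []
  | c :: rest =>
    let i : Nat := 1 + (rest.takeWhile (· == c)).length
    (i : Int) :: runLengths (rest.drop (i - 1))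
termination_by xs.length
decreasing_by
  simp only [List.length_cons, List.length_drop]
  omega

def find_checksum_alt (ids : List String) : Int :=
  let r := ids.foldl (fun (st : Int × Int) entry =>
    let runs := runLengths (PySem.List.sorted entry.toList (fun c => c) false)
    let twos := if (2 : Int) ∈ runs then st.1 + 1 else st.1
    let threes := if runs.any (fun n => n > 2) then st.2 + 1 else st.2
    (twos, threes)) (0, 0)
  r.1 * r.2

-- ===== PRECONDITION & SPEC =====
def Spec_find_checksum (ids : List String) (out : Int) : Prop := out = find_checksum_alt ids
instance (ids : List String) (out : Int) : Decidable (Spec_find_checksum ids out) := by unfold Spec_find_checksum; infer_instance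

-- ===== CLAIM (what is proved, stated in full; the proofs are below) =====
def Claim_equal_find_checksum : Prop := ∀ (ids : List String), Dom_find_checksum ids → Spec_find_checksum ids (find_checksum ids)

-- ===== LEMMAS AND PROOFS =====

-- A's find_freq is the standard counter
lemma find_freq_eq_counter (entry : String) :
    find_freq entry = PySem.Dict.counter entry.toList := by
  have hfun : (fun (d : PySem.Dict Char Int) c =>
      if d.contains c then d.insert c (d.getD c 0 + 1) else d.insert c 1)
      = (fun d c => d.insert c (d.getD c 0 + 1)) := by
    funext d c
    by_cases h : d.contains c = true
    · simp [h]
    · have hnone : d.get? c = none := by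
        rw [PySem.Dict.get?_eq_none_iff_contains]
        simpa using h
      simp [h, PySem.Dict.getD, hnone]
  rw [find_freq, hfun, PySem.Dict.foldl_insert_getD_add_one_eq_counter]

-- A's flag loop sets each component to 1 exactly when some key satisfies the branch condition
lemma flag_fold (g : Char → Int) (ks : List Char) (st : Int × Int) :
    ks.foldl (fun (t : Int × Int) c =>
        if g c > 2 then (t.1, 1) else if g c = 2 then (1, t.2) else t) st
      = ((if ks.any (fun c => g c == 2) then 1 else st.1),
         (if ks.any (fun c => decide (g c > 2)) then 1 else st.2)) := by
  induction ks generalizing st with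
  | nil => simp
  | cons k ks ih =>
    simp only [List.foldl_cons, List.any_cons, ih]
    by_cases h3 : g k > 2
    · have h2 : ¬ g k = 2 := by omega
      simp [h3, h2]
    · by_cases h2 : g k = 2
      · simp [h2]
      · simp [h3, h2]

-- the common outer accumulation
lemma fold_pair (p q : String → Bool) (ids : List String) (a b : Int) :
    ids.foldl (fun (st : Int × Int) e =>
        (st.1 + (if p e then (1 : Int) else 0), st.2 + (if q e then (1 : Int) else 0))) (a, b)
      = (a + ((ids.countP p : Nat) : Int), b + ((ids.countP q : Nat) : Int)) := by
  induction ids generalizing a b with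
  | nil => simp
  | cons e ids ih =>
    simp only [List.foldl_cons, ih, List.countP_cons]
    rw [Prod.mk.injEq]
    constructor <;> split_ifs <;> push_cast <;> ring

def pvP2 (e : String) : Bool := decide (∃ c ∈ e.toList, ((e.toList.count c : Nat) : Int) = 2)
def pvP3 (e : String) : Bool := decide (∃ c ∈ e.toList, ((e.toList.count c : Nat) : Int) > 2)

lemma A_eval (ids : List String) :
    find_checksum ids = ((ids.countP pvP2 : Nat) : Int) * ((ids.countP pvP3 : Nat) : Int) := by
  rw [find_checksum]
  have hstep : (fun (st : Int × Int) entry =>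
      let fm := find_freq entry
      let tf := fm.keys.foldl (fun (t : Int × Int) c =>
        let freq := fm.getD c 0
        if freq > 2 then (t.1, 1)
        else if freq = 2 then (1, t.2)
        else t) (0, 0)
      (st.1 + tf.2, st.2 + tf.1))
      = (fun (st : Int × Int) e =>
        (st.1 + (if pvP3 e then (1 : Int) else 0), st.2 + (if pvP2 e then (1 : Int) else 0))) := by
    funext st entry
    have h2 : ((PySem.Dict.counter entry.toList).keys.any
        (fun c => ((PySem.Dict.counter entry.toList).getD c 0 : Int) == 2)) = pvP2 entry := by
      rw [Bool.eq_iff_iff]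
      simp [PySem.Dict.keys_counter, PySem.Dict.getD_counter, PySem.Set.mem_ofList,
        List.any_eq_true, pvP2]
    have h3 : ((PySem.Dict.counter entry.toList).keys.any
        (fun c => decide (((PySem.Dict.counter entry.toList).getD c 0 : Int) > 2))) = pvP3 entry := by
      rw [Bool.eq_iff_iff]
      simp [PySem.Dict.keys_counter, PySem.Dict.getD_counter, PySem.Set.mem_ofList,
        List.any_eq_true, pvP3]
    simp only [find_freq_eq_counter, flag_fold, h2, h3]
  rw [hstep, fold_pair]
  simp

-- run lengths of a ≤-sorted list satisfy: some run satisfies P iff some element's count does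
lemma runLengths_exists_aux (P : Int → Prop) [DecidablePred P] :
    ∀ (n : Nat) (xs : List Char), xs.length ≤ n → xs.Pairwise (· ≤ ·) →
      ((∃ r ∈ runLengths xs, P r) ↔ ∃ c ∈ xs, P ((xs.count c : Nat) : Int)) := by
  intro n
  induction n with
  | zero =>
    intro xs hlen _
    have : xs = [] := List.eq_nil_of_length_eq_zero (Nat.le_zero.mp hlen)
    subst this
    simp [runLengths]
  | succ n ih =>
    intro xs hlen h
    cases xs with
    | nil => simp [runLengths]
    | cons c rest =>
      have hc := (List.pairwise_cons.mp h).1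
      have hpr := (List.pairwise_cons.mp h).2
      set t := rest.takeWhile (· == c) with ht
      set d := rest.dropWhile (· == c) with hd
      have hrest : t ++ d = rest := List.takeWhile_append_dropWhile
      have ht_all : ∀ x ∈ t, x = c := by
        intro x hx
        have := List.mem_takeWhile_imp hx
        simpa [beq_iff_eq] using this
      have hd_lt : ∀ x ∈ d, c < x := by
        intro x hx
        match hdm : d with
        | [] => simp at hx
        | e :: d' =>
          have hne : ¬ (e == c) = true := by
            have := List.head?_dropWhile_not (fun x => x == c) rest
            rw [← hd] at this
            simpa using this
          have hed : e ∈ rest := by rw [← hrest]; simp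
          have hnec : e ≠ c := by simpa using hne
          have hce : c < e := lt_of_le_of_ne (hc e hed) hnec.symm
          have hdp : (e :: d').Pairwise (· ≤ ·) := by
            rw [hd]
            exact hpr.sublist (List.dropWhile_sublist _)
          rcases List.mem_cons.mp hx with rfl | hx'
          · exact hce
          · exact lt_of_lt_of_le hce ((List.pairwise_cons.mp hdp).1 x hx')
      have hd_ne : ∀ x ∈ d, x ≠ c := fun x hx => ne_of_gt (hd_lt x hx)
      have hcd : d.count c = 0 := List.count_eq_zero.mpr (fun hx => hd_ne c hx rfl)
      have hct : t.count c = t.length := List.count_eq_length.mpr (fun b hb => (ht_all b hb).symm)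
      have hcount_c : (c :: rest).count c = 1 + t.length := by
        rw [← hrest]
        simp [List.count_append, hct, hcd]
        omega
      have hcount_ne : ∀ x, x ≠ c → (c :: rest).count x = d.count x := by
        intro x hx
        have htx : t.count x = 0 :=
          List.count_eq_zero.mpr (fun hm => hx (ht_all x hm))
        rw [← hrest]
        simp [List.count_append, htx, Ne.symm hx]
      have hdrop : rest.drop (1 + t.length - 1) = d := by
        have : 1 + t.length - 1 = t.length := by omega
        rw [this, ← hrest, List.drop_left]
      have hdp : d.Pairwise (· ≤ ·) := hpr.sublist (List.dropWhile_sublist _)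
      have hdlen : d.length ≤ n := by
        have h1 : d.length ≤ rest.length := (List.dropWhile_sublist _).length_le
        have h2 : rest.length + 1 ≤ n + 1 := by simpa using hlen
        omega
      have hih := ih d hdlen hdp
      have hrl : runLengths (c :: rest) = ((1 + t.length : Nat) : Int) :: runLengths d := by
        rw [runLengths]
        simp only [← ht, hdrop]
      rw [hrl]
      constructor
      · rintro ⟨r, hr, hPr⟩
        rcases List.mem_cons.mp hr with rfl | hr'
        · exact ⟨c, List.mem_cons_self, by rw [hcount_c]; exact hPr⟩
        · rcases hih.mp ⟨r, hr', hPr⟩ with ⟨x, hxd, hPx⟩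
          refine ⟨x, ?_, ?_⟩
          · exact List.mem_cons.mpr (Or.inr (by rw [← hrest]; exact List.mem_append.mpr (Or.inr hxd)))
          · rw [show (c :: rest).count x = d.count x from hcount_ne x (hd_ne x hxd)]
            exact hPx
      · rintro ⟨x, hx, hPx⟩
        by_cases hxc : x = c
        · subst hxc
          exact ⟨((1 + t.length : Nat) : Int), List.mem_cons_self, by rw [hcount_c] at hPx; exact hPx⟩
        · have hxr : x ∈ rest := by
            rcases List.mem_cons.mp hx with rfl | hr
            · exact absurd rfl hxc
            · exact hr
          have hxd : x ∈ d := by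
            rw [← hrest] at hxr
            rcases List.mem_append.mp hxr with hmt | hmd
            · exact absurd (ht_all x hmt) hxc
            · exact hmd
          rcases hih.mpr ⟨x, hxd, by rw [← hcount_ne x hxc]; exact hPx⟩ with ⟨r, hr, hPr⟩
          exact ⟨r, List.mem_cons.mpr (Or.inr hr), hPr⟩

lemma runLengths_exists (P : Int → Prop) [DecidablePred P] (xs : List Char)
    (h : xs.Pairwise (· ≤ ·)) :
    ((∃ r ∈ runLengths xs, P r) ↔ ∃ c ∈ xs, P ((xs.count c : Nat) : Int)) :=
  runLengths_exists_aux P xs.length xs le_rfl h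

lemma B_flag2 (entry : String) :
    decide ((2 : Int) ∈ runLengths (PySem.List.sorted entry.toList (fun c => c) false))
      = pvP2 entry := by
  set s := PySem.List.sorted entry.toList (fun c => c) false with hs
  have hp : s.Pairwise (· ≤ ·) := by
    simpa using PySem.List.sorted_pairwise (xs := entry.toList) (key := fun c => c)
  have hperm : s.Perm entry.toList := PySem.List.sorted_perm _ _ _
  rw [pvP2, decide_eq_decide]
  constructor
  · intro h2
    rcases (runLengths_exists (fun r => r = 2) s hp).mp ⟨2, h2, rfl⟩ with ⟨c, hcs, hc2⟩
    refine ⟨c, hperm.mem_iff.mp hcs, ?_⟩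
    rw [← hperm.count_eq]
    exact hc2
  · rintro ⟨c, hcl, hc2⟩
    rcases (runLengths_exists (fun r => r = 2) s hp).mpr
      ⟨c, hperm.mem_iff.mpr hcl, by rw [hperm.count_eq]; exact hc2⟩ with ⟨r, hr, hr2⟩
    rw [← hr2]
    exact hr

lemma B_flag3 (entry : String) :
    (runLengths (PySem.List.sorted entry.toList (fun c => c) false)).any (fun n => n > 2)
      = pvP3 entry := by
  set s := PySem.List.sorted entry.toList (fun c => c) false with hs
  have hp : s.Pairwise (· ≤ ·) := by
    simpa using PySem.List.sorted_pairwise (xs := entry.toList) (key := fun c => c)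
  have hperm : s.Perm entry.toList := PySem.List.sorted_perm _ _ _
  rw [pvP3, Bool.eq_iff_iff]
  simp only [List.any_eq_true, decide_eq_true_eq]
  constructor
  · rintro ⟨r, hr, hr3⟩
    rcases (runLengths_exists (fun r => r > 2) s hp).mp ⟨r, hr, hr3⟩ with ⟨c, hcs, hc3⟩
    refine ⟨c, hperm.mem_iff.mp hcs, ?_⟩
    rw [← hperm.count_eq]
    exact hc3
  · rintro ⟨c, hcl, hc3⟩
    exact (runLengths_exists (fun r => r > 2) s hp).mpr
      ⟨c, hperm.mem_iff.mpr hcl, by rw [hperm.count_eq]; exact hc3⟩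

lemma B_eval (ids : List String) :
    find_checksum_alt ids = ((ids.countP pvP2 : Nat) : Int) * ((ids.countP pvP3 : Nat) : Int) := by
  rw [find_checksum_alt]
  have hstep : (fun (st : Int × Int) entry =>
      let runs := runLengths (PySem.List.sorted entry.toList (fun c => c) false)
      let twos := if (2 : Int) ∈ runs then st.1 + 1 else st.1
      let threes := if runs.any (fun n => n > 2) then st.2 + 1 else st.2
      (twos, threes))
      = (fun (st : Int × Int) e =>
        (st.1 + (if pvP2 e then (1 : Int) else 0), st.2 + (if pvP3 e then (1 : Int) else 0))) := by
    funext st entry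
    set runs := runLengths (PySem.List.sorted entry.toList (fun c => c) false) with hruns
    have h2 : pvP2 entry = decide ((2 : Int) ∈ runs) := (B_flag2 entry).symm
    have h3 : pvP3 entry = runs.any (fun n => n > 2) := (B_flag3 entry).symm
    simp only [h2, h3]
    by_cases m2 : (2 : Int) ∈ runs <;> by_cases m3 : runs.any (fun n => n > 2) = true <;>
      simp [m2, m3]
  rw [hstep, fold_pair]
  simp

-- ===== VERDICT (by name: the statement is the Claim_ definition above) =====
theorem find_checksum_spec : Claim_equal_find_checksum := by
  intro ids _
  unfold Spec_find_checksum
  rw [A_eval, B_eval]
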